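-- pv_equiv track=rewrite | github.com/nowshad7/AI_Lab | Lab1/Assignment1/Find_aunty.py | find_aunty
-- ===== SOURCE A (Python) =====
-- tupleList1 = [('parent','Rashid','Hasib'),
--               ('parent','Hasib','Rebeka'),
--               ('parent','Hasib','Selina'),
--               ('parent','Rebeka','Sohel'),
--               ('parent','Rebeka','Rakib'),
--               ('parent','Selina','Jobayer'),
--               ('parent','Selina','Imtiyaz')
--               ]
--
-- tupleList2 = [('Rashid','M'),('Hasib','M'),('Rakib','M'),('Jobayer','M'),('Sohel','M'),('Rebeka','F'),('Selina','F'),('Imtiyaz','M')]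
--
-- def find_aunty(X):
--     found = 0;
--
--     i = 0
--     while(i<=6):
--         if((tupleList1[i][0] == 'parent')&(tupleList1[i][2] == X)):
--            for j in range(7):
--                if((tupleList1[j][0] == 'parent')&(tupleList1[i][1] == tupleList1[j][1]) & (tupleList1[j][2] != X)):
--                    for k in range(8):
--                        if((tupleList2[k][0] == tupleList1[j][2]) & (tupleList2[k][1] == 'F')):
--                            return tupleList1[j][2]
--                            found = 1
--
--         i=i+1
--     if(found == 0):
--         return 'No Sister'
-- ===== SOURCE B (Python) =====
-- tupleList1 = [('parent','Rashid','Hasib'),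
--               ('parent','Hasib','Rebeka'),
--               ('parent','Hasib','Selina'),
--               ('parent','Rebeka','Sohel'),
--               ('parent','Rebeka','Rakib'),
--               ('parent','Selina','Jobayer'),
--               ('parent','Selina','Imtiyaz')
--               ]
--
-- tupleList2 = [('Rashid','M'),('Hasib','M'),('Rakib','M'),('Jobayer','M'),('Sohel','M'),('Rebeka','F'),('Selina','F'),('Imtiyaz','M')]
--
-- GENDER = dict(tupleList2)
-- PARENT = {}
-- CHILDREN = {}
-- for _, p, c in tupleList1:
--     PARENT[c] = p
--     CHILDREN.setdefault(p, []).append(c)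
--
-- def find_aunty(X):
--     p = PARENT.get(X)
--     if p is None:
--         return 'No Sister'
--     for sib in CHILDREN[p]:
--         if sib != X and GENDER.get(sib) == 'F':
--             return sib
--     return 'No Sister'
-- ===== Notes on version B (the rewrite author's own statement) =====
-- stated objective: simpler
-- what changed: Replaced the three nested index loops over the raw tuple lists with precomputed parent/children/gender dictionaries built once at module load, so the lookup is a direct parent lookup followed by one scan over that parent's children.
import Mathlib
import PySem

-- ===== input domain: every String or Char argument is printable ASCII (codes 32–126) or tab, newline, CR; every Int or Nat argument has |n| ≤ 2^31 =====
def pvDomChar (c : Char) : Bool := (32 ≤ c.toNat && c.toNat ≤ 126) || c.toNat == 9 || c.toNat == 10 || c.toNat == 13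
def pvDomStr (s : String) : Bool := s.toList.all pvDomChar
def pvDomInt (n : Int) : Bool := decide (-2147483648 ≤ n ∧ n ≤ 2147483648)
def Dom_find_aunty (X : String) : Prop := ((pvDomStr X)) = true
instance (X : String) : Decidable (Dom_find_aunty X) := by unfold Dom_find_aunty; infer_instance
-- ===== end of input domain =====

-- B replaces A's three nested scans of the raw tuple lists with one-time parent/children/gender tables and a single scan of X's siblings (objective: simpler).

-- ===== PORT A =====
def tupleList1 : List (String × String × String) :=
  [("parent","Rashid","Hasib"), ("parent","Hasib","Rebeka"), ("parent","Hasib","Selina"),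
   ("parent","Rebeka","Sohel"), ("parent","Rebeka","Rakib"), ("parent","Selina","Jobayer"),
   ("parent","Selina","Imtiyaz")]

def tupleList2 : List (String × String) :=
  [("Rashid","M"),("Hasib","M"),("Rakib","M"),("Jobayer","M"),("Sohel","M"),
   ("Rebeka","F"),("Selina","F"),("Imtiyaz","M")]

-- inner k-loop: for k in range(8): if tupleList2[k][0]==c and tupleList2[k][1]=='F': return c
def kLoopA (c : String) : List (String × String) → Option String
  | [] => none
  | (n, g) :: rest => if n == c && g == "F" then some c else kLoopA c rest

-- middle j-loop over tupleList1 with parent ip of X, child ≠ X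
def jLoopA (X ip : String) : List (String × String × String) → Option String
  | [] => none
  | (tag, p, c) :: rest =>
    if tag == "parent" && ip == p && c != X then
      match kLoopA c tupleList2 with
      | some r => some r
      | none => jLoopA X ip rest
    else jLoopA X ip rest

-- outer while-loop over i = 0..6 scanning tupleList1 for a tuple whose child is X
def iLoopA (X : String) : List (String × String × String) → Option String
  | [] => none
  | (tag, p, c) :: rest =>
    if tag == "parent" && c == X then
      match jLoopA X p tupleList1 with
      | some r => some r
      | none => iLoopA X rest
    else iLoopA X rest

def find_aunty (X : String) : String :=
  match iLoopA X tupleList1 with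
  | some r => r
  | none => "No Sister"

-- ===== PORT B =====
def altGENDER : PySem.Dict String String := PySem.Dict.ofList tupleList2

-- PARENT, CHILDREN built by one loop (setdefault+append = modify with default [])
def altTables : PySem.Dict String String × PySem.Dict String (List String) :=
  tupleList1.foldl
    (fun d t => (d.1.insert t.2.2 t.2.1, d.2.modify t.2.1 [] (· ++ [t.2.2])))
    (PySem.Dict.empty, PySem.Dict.empty)

def find_aunty_alt (X : String) : String :=
  match (altTables.1).get? X with
  | none => "No Sister"
  | some p =>
    match ((altTables.2).getD p []).find?
        (fun sib => sib != X && ((altGENDER.get? sib) == some "F")) with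
    | some sib => sib
    | none => "No Sister"

-- ===== PRECONDITION & SPEC =====
def Spec_find_aunty (X : String) (out : String) : Prop := out = find_aunty_alt X
instance (X : String) (out : String) : Decidable (Spec_find_aunty X out) := by unfold Spec_find_aunty; infer_instance

-- ===== CLAIM (what is proved, stated in full; the proofs are below) =====
def Claim_equal_find_aunty : Prop := ∀ (X : String), Dom_find_aunty X → Spec_find_aunty X (find_aunty X)

-- ===== LEMMAS AND PROOFS =====
theorem find_aunty_eq_alt (X : String) : find_aunty X = find_aunty_alt X := by
  by_cases h1 : X = "Hasib";   · subst h1; decide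
  by_cases h2 : X = "Rebeka";  · subst h2; decide
  by_cases h3 : X = "Selina";  · subst h3; decide
  by_cases h4 : X = "Sohel";   · subst h4; decide
  by_cases h5 : X = "Rakib";   · subst h5; decide
  by_cases h6 : X = "Jobayer"; · subst h6; decide
  by_cases h7 : X = "Imtiyaz"; · subst h7; decide
  -- X is no child: A's outer loop never fires, B's parent lookup misses
  have hp : altTables.1 = PySem.Dict.mk
      [("Hasib","Rashid"),("Rebeka","Hasib"),("Selina","Hasib"),("Sohel","Rebeka"),
       ("Rakib","Rebeka"),("Jobayer","Selina"),("Imtiyaz","Selina")] := by decide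
  simp [find_aunty, find_aunty_alt, iLoopA, tupleList1, hp, PySem.Dict.get?_mk_cons,
        Ne.symm h1, Ne.symm h2, Ne.symm h3, Ne.symm h4, Ne.symm h5, Ne.symm h6, Ne.symm h7,
        PySem.Dict.get?]

-- ===== VERDICT (by name: the statement is the Claim_ definition above) =====
theorem find_aunty_spec : Claim_equal_find_aunty := by
  intro X _
  exact find_aunty_eq_alt X
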